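-- pv_equiv track=rewrite | github.com/Wybxc/chinese-corpus | generate/conversations.py | to_yml
-- ===== SOURCE A (Python) =====
-- def to_yml(f):
--   new = True
--   for i in f:
--     if i.strip() == '':
--       continue
--     if i.strip() == '===':
--       new = True
--       continue
--     if new:
--       yield '- - ' + i[2:]
--     else:
--       yield '  - ' + i[2:]
--     new = False
-- ===== SOURCE B (Python) =====
-- def _blocks(f):
--     cur = []
--     for i in f:
--         s = i.strip()
--         if s == '':
--             continue
--         if s == '===':
--             if cur:
--                 yield cur
--             cur = []
--         else:
--             cur.append(i)
--     if cur:
--         yield cur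
--
-- def to_yml(f):
--     for block in _blocks(f):
--         yield '- - ' + block[0][2:]
--         for line in block[1:]:
--             yield '  - ' + line[2:]
-- ===== Notes on version B (the rewrite author's own statement) =====
-- stated objective: alternative
-- what changed: Replaces the rolling 'new' boolean flag with a two-stage decomposition: an inner generator groups the non-blank lines into blocks split on '===' separators, and the outer loop emits each block as a YAML item ('- - ' head, ' - ' continuation lines).
import Mathlib
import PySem

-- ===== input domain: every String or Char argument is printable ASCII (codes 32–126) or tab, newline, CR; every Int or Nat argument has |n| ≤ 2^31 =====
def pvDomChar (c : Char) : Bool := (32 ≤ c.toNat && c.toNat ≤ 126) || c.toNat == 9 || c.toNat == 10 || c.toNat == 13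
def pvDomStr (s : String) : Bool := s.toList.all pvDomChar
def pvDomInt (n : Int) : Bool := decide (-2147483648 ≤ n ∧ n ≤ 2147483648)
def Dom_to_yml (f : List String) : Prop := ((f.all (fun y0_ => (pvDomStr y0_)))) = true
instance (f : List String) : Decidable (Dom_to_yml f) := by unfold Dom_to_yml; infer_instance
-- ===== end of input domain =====

-- B replaces A's rolling 'new' flag with a block-grouping pass (split on '===') followed by per-block emission; alternative decomposition, same cost.


-- ===== PORT A =====
-- A's loop: state is the 'new' flag; blanks skipped, '===' resets the flag, other lines emitted.
def toYmlLoop (f : List String) (new : Bool) : List String :=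
  match f with
  | [] => []
  | i :: rest =>
    if PySem.Str.strip i == "" then toYmlLoop rest new
    else if PySem.Str.strip i == "===" then toYmlLoop rest true
    else (if new then "- - " ++ PySem.Str.slice i (some 2) none
          else "  - " ++ PySem.Str.slice i (some 2) none) :: toYmlLoop rest false

def to_yml (f : List String) : List String := toYmlLoop f true

-- ===== PORT B =====
-- B's inner generator: group non-blank lines into blocks, flushing on '===' and at EOF; empty blocks never yielded.
def blocksLoop (f : List String) (cur : List String) : List (List String) :=
  match f with
  | [] => if cur = [] then [] else [cur]
  | i :: rest =>
    if PySem.Str.strip i == "" then blocksLoop rest cur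
    else if PySem.Str.strip i == "===" then
      (if cur = [] then blocksLoop rest [] else cur :: blocksLoop rest [])
    else blocksLoop rest (cur ++ [i])

-- B's outer loop: emit each block as one YAML item.
def emitBlock (b : List String) : List String :=
  match b with
  | [] => []
  | h :: t => ("- - " ++ PySem.Str.slice h (some 2) none)
              :: t.map (fun line => "  - " ++ PySem.Str.slice line (some 2) none)

def to_yml_alt (f : List String) : List String :=
  (blocksLoop f []).flatMap emitBlock

-- ===== PRECONDITION & SPEC =====
def Spec_to_yml (f : List String) (out : List String) : Prop := out = to_yml_alt f
instance (f : List String) (out : List String) : Decidable (Spec_to_yml f out) := by unfold Spec_to_yml; infer_instance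

-- ===== CLAIM (what is proved, stated in full; the proofs are below) =====
def Claim_equal_to_yml : Prop := ∀ (f : List String), Dom_to_yml f → Spec_to_yml f (to_yml f)

-- ===== LEMMAS AND PROOFS =====
-- Loop invariant: emitting the blocks produced from state `cur` equals the pending
-- emission of `cur` followed by A's loop run from the matching flag state.
theorem blocks_emit (f : List String) (cur : List String) :
    (blocksLoop f cur).flatMap emitBlock =
      (match cur with
       | [] => toYmlLoop f true
       | h :: t => emitBlock (h :: t) ++ toYmlLoop f false) := by
  induction f generalizing cur with
  | nil =>
    cases cur with
    | nil => simp [blocksLoop, toYmlLoop]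
    | cons h t => simp [blocksLoop, toYmlLoop]
  | cons i rest ih =>
    by_cases hb : PySem.Str.strip i == ""
    · cases cur with
      | nil => simp [blocksLoop, toYmlLoop, hb, ih]
      | cons h t => simp [blocksLoop, toYmlLoop, hb, ih]
    · by_cases hs : PySem.Str.strip i == "==="
      · cases cur with
        | nil => simp [blocksLoop, toYmlLoop, hb, hs, ih]
        | cons h t => simp [blocksLoop, toYmlLoop, hb, hs, ih]
      · cases cur with
        | nil =>
          simp [blocksLoop, toYmlLoop, hb, hs, ih [i], emitBlock]
        | cons h t =>
          simp only [blocksLoop, toYmlLoop, hb, hs, Bool.false_eq_true,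
            if_false, List.cons_append]
          rw [ih (h :: (t ++ [i]))]
          simp [emitBlock, List.map_append]

-- ===== VERDICT (by name: the statement is the Claim_ definition above) =====
theorem to_yml_spec : Claim_equal_to_yml := by
  intro f _
  show to_yml f = to_yml_alt f
  unfold to_yml to_yml_alt
  simpa using (blocks_emit f []).symm
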